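-- pv_equiv track=rewrite | github.com/bog-walk/project-euler-python | solution/batch7/problem79.py | derive_passcode
-- ===== SOURCE A (Python) =====
-- def derive_passcode(logins: list[str]) -> str | None:
--     """
--     Solution stores all connections between each login character & characters that
--     potentially precede it in the passcode, using a pseudo-graph.
--
--     A stored character will be next in the passcode if it has degree 0 (i.e. no
--     connecting edges), with multiple choices being judged based on their
--     lexicographic order (as the cache is a list, the smallest will be the first
--     element found that is an empty set).
--
--     Once a character is added to the passcode, its presence in the list is
--     nullified & it is removed from all characters that referenced it as an edge.
--
--     A passcode is considered invalid/unattainable if at any point there are no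
--     degree 0 characters & a null value is returned.
--
--     N.B. A dictionary could be used to cache all character nodes & references &
--     would require dictionary keys to be sorted to find the smallest insert for
--     every iteration.
--     """
--
--     # reduce cache size to ASCII characters between 33 and 126 inclusive
--     offset = 33
--     connections: list[set[int] | None] = [None]*(127 - offset)
--     for login in logins:
--         # normalise login character ASCII to fit in cache
--         codes = [ord(ch) - offset for ch in login]
--         for i in range(3):
--             if i == 0:
--                 # create a new set if a new character
--                 # otherwise preceding characters unknown
--                 if connections[codes[0]] is None:
--                     connections[codes[0]] = set()
--             else:
--                 if connections[codes[i]] is None: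
--                     connections[codes[i]] = {codes[i-1]}
--                 else:
--                     connections[codes[i]].update({codes[i - 1]})
--     passcode = ""
--     # break loop if no more edges exist
--     while any(edges is not None for edges in connections):
--         try:
--             smallest = connections.index(set())
--             passcode += chr(smallest + offset)
--             # remove all existence of the character just added
--             connections[smallest] = None
--             for i in range(94):
--                 if connections[i] is not None:
--                     # this function does nothing if the element is not present
--                     # so no need to check each set for it first
--                     connections[i].discard(smallest)
--         except ValueError:
--             # break loop if no isolated characters exist
--             return None
--     return passcode
-- ===== SOURCE B (Python) =====
-- def derive_passcode(logins: list[str]) -> str | None: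
--     # Build the predecessor sets once, then peel off ready characters by
--     # tracking the set of already-emitted slots instead of mutating the graph.
--     offset = 33
--     preds = [None] * 94
--     for login in logins:
--         codes = [ord(ch) - offset for ch in login]
--         a, b, c = codes[:3]
--         if preds[a] is None:
--             preds[a] = set()
--         for p, q in ((a, b), (b, c)):
--             if preds[q] is None:
--                 preds[q] = set()
--             preds[q].add(p)
--     passcode = []
--     removed = set()
--     pending = sum(1 for s in preds if s is not None)
--     while pending:
--         ready = next((i for i, s in enumerate(preds)
--                       if s is not None and i not in removed and s <= removed),
--                      None)
--         if ready is None: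
--             return None
--         removed.add(ready)
--         passcode.append(chr(ready + offset))
--         pending -= 1
--     return "".join(passcode)
-- ===== Notes on version B (the rewrite author's own statement) =====
-- stated objective: alternative
-- what changed: B builds the predecessor sets in one pass and then selects ready characters by testing each frozen set against a growing set of already-emitted slots (subset test with a remaining counter), instead of A's destructive loop that rescans with list.index(set()) and discards the emitted slot from every remaining set on each round; Pre_ excludes logins shorter than 3 characters, on which A raises IndexError.
import Mathlib
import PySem

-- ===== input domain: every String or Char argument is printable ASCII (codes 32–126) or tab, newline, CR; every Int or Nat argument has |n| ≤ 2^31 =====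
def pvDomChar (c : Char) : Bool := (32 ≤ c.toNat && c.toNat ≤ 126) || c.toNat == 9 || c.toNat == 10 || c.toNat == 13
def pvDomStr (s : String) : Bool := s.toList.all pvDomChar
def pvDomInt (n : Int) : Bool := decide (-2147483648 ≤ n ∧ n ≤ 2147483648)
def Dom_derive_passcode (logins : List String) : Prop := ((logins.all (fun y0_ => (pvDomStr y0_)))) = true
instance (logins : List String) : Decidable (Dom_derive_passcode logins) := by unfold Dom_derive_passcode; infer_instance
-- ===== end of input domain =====

set_option maxRecDepth 4096
set_option maxHeartbeats 1000000


-- B builds the predecessor sets once and then peels off ready characters against a growing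
-- set of already-emitted slots (subset test + remaining counter), instead of A's destructive
-- loop that rescans with list.index(set()) and discards the emitted slot from every set
-- (objective: alternative algorithm structure, similar cost).

-- ===== PORT A =====
-- one pass of A's `for i in range(3)` body over the fold state `conns`
-- (list indices may be negative: Python wraps them; PySem.List.pyGetD/pySetD are exact there;
--  `codes[i]` uses pyGetD with default 0 — exact under Pre_, which demands len(login) >= 3)
def pvStepA (codes : List Int) (conns : List (Option (PySem.Set Int))) (i : Int) :
    List (Option (PySem.Set Int)) :=
  if i == 0 then
    match PySem.List.pyGetD conns (PySem.List.pyGetD codes 0 0) none with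
    | none => PySem.List.pySetD conns (PySem.List.pyGetD codes 0 0) (some PySem.Set.empty)
    | some _ => conns
  else
    match PySem.List.pyGetD conns (PySem.List.pyGetD codes i 0) none with
    | none =>
        PySem.List.pySetD conns (PySem.List.pyGetD codes i 0)
          (some (PySem.Set.add PySem.Set.empty (PySem.List.pyGetD codes (i-1) 0)))
    | some s =>
        PySem.List.pySetD conns (PySem.List.pyGetD codes i 0)
          (some (PySem.Set.update s (PySem.Set.add PySem.Set.empty (PySem.List.pyGetD codes (i-1) 0))))

def pvBuildA (conns : List (Option (PySem.Set Int))) (login : String) :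
    List (Option (PySem.Set Int)) :=
  let codes : List Int := login.toList.map (fun ch => (ch.toNat : Int) - 33)
  (PySem.List.pyRange 0 3 1).foldl (pvStepA codes) conns

-- `connections.index(set())`: Python's list.index compares with ==; None == set() is False,
-- and a PySem.Set (a duplicate-free list) equals set() iff Set.equal with the empty set.
def pvEmptyPred (o : Option (PySem.Set Int)) : Bool :=
  match o with
  | none => false
  | some s => PySem.Set.equal s PySem.Set.empty

def pvFindEmptyA (conns : List (Option (PySem.Set Int))) : Option Nat :=
  conns.findIdx? pvEmptyPred

-- `for i in range(94): if connections[i] is not None: connections[i].discard(smallest)`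
def pvDiscardAllA (conns : List (Option (PySem.Set Int))) (smallest : Nat) :
    List (Option (PySem.Set Int)) :=
  (PySem.List.pyRange 0 94 1).foldl (fun cs i =>
    match PySem.List.pyGetD cs i none with
    | none => cs
    | some s => PySem.List.pySetD cs i (some (PySem.Set.discard s (smallest : Int)))) conns

-- the `while` loop; the fuel is a guard only: with 94 slots, 95 is never exhausted
def pvLoopA : Nat → List (Option (PySem.Set Int)) → String → Option String
  | 0, _, _ => none
  | fuel+1, conns, passcode =>
    if conns.any (fun o => o.isSome) then
      match pvFindEmptyA conns with
      | none => none
      | some smallest =>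
          pvLoopA fuel (pvDiscardAllA (PySem.List.pySetD conns (smallest : Int) none) smallest)
            (passcode.push (Char.ofNat (smallest + 33)))
    else some passcode

def derive_passcode (logins : List String) : Option String :=
  pvLoopA 95 (logins.foldl pvBuildA (List.replicate (127 - 33) none)) ""

-- ===== PORT B =====
-- one edge (p, c): `if preds[c] is None: preds[c] = set()` then `preds[c].add(p)`
-- (negative list indices wrap as in Python via pySetD/pyGetD; the `none` fall-through of the
--  second match is unreachable — the cell was just ensured — and only keeps the port total)
def pvEdgeB (preds : List (Option (PySem.Set Int))) (pc : Int × Int) :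
    List (Option (PySem.Set Int)) :=
  let preds1 :=
    match PySem.List.pyGetD preds pc.2 none with
    | none => PySem.List.pySetD preds pc.2 (some PySem.Set.empty)
    | some _ => preds
  match PySem.List.pyGetD preds1 pc.2 none with
  | none => preds1
  | some s => PySem.List.pySetD preds1 pc.2 (some (PySem.Set.add s pc.1))

-- one login: `a, b, c = codes[:3]` (ValueError on shorter logins — excluded by Pre_; the
-- fall-through branch on a short list only keeps the port total), ensure a cell for a,
-- then the two edges
def pvBuildB (preds : List (Option (PySem.Set Int))) (login : String) :
    List (Option (PySem.Set Int)) :=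
  let codes : List Int := login.toList.map (fun ch => (ch.toNat : Int) - 33)
  match codes with
  | a :: b :: c :: _ =>
      let preds1 :=
        match PySem.List.pyGetD preds a none with
        | none => PySem.List.pySetD preds a (some PySem.Set.empty)
        | some _ => preds
      [(a, b), (b, c)].foldl pvEdgeB preds1
  | _ => preds

-- `next((i for i, s in enumerate(preds) if s is not None and i not in removed and s <= removed), None)`
def pvFindReadyB (preds : List (Option (PySem.Set Int))) (removed : PySem.Set Int) :
    Option Int :=
  ((PySem.List.enumerate preds).find? (fun is =>
      match is.2 with
      | none => false
      | some s => !(PySem.Set.contains removed is.1) && PySem.Set.issubset s removed)).map (·.1)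

-- the `while pending` loop, recursing on the counter it decrements
def pvLoopB : Nat → List (Option (PySem.Set Int)) → PySem.Set Int → List Char → Option String
  | 0, _, _, acc => some (String.ofList acc)      -- "".join of the collected characters
  | pending+1, preds, removed, acc =>
    match pvFindReadyB preds removed with
    | none => none
    | some i =>
        pvLoopB pending preds (PySem.Set.add removed i) (acc ++ [Char.ofNat (i.toNat + 33)])

def derive_passcode_alt (logins : List String) : Option String :=
  let preds := logins.foldl pvBuildB (List.replicate 94 none)
  -- `pending = sum(1 for s in preds if s is not None)`
  pvLoopB (preds.foldl (fun n s => if s.isSome then n + 1 else n) 0) preds PySem.Set.empty []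

-- ===== PRECONDITION & SPEC =====
-- Pre_ excludes logins shorter than 3 characters, on which A raises IndexError at codes[i].
def Pre_derive_passcode (logins : List String) : Prop :=
  ∀ login ∈ logins, 3 ≤ login.toList.length
instance (logins : List String) : Decidable (Pre_derive_passcode logins) := by
  unfold Pre_derive_passcode; infer_instance

def pvWitness_derive_passcode : List String := (["cab", "cba"])

def Spec_derive_passcode (logins : List String) (out : Option String) : Prop :=
  out = derive_passcode_alt logins
instance (logins : List String) (out : Option String) : Decidable (Spec_derive_passcode logins out) := by
  unfold Spec_derive_passcode; infer_instance

-- ===== CLAIM (what is proved, stated in full; the proofs are below) =====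
def Claim_equal_derive_passcode : Prop :=
  ∀ (logins : List String), Dom_derive_passcode logins → Pre_derive_passcode logins →
    Spec_derive_passcode logins (derive_passcode logins)

-- ===== LEMMAS AND PROOFS =====

def pvSlot (x : Int) : Nat := (PySem.Int.mod x 94).toNat
def pvInRange (x : Int) : Prop := -94 ≤ x ∧ x < 94

theorem pvMod_spec (x : Int) (h : pvInRange x) :
    PySem.Int.mod x 94 = if 0 ≤ x then x else x + 94 := by
  have h0 := PySem.Int.mod_nonneg x (b := 94) (by norm_num)
  have h1 := PySem.Int.mod_lt x (b := 94) (by norm_num)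
  have h2 := PySem.Int.floordiv_mul_add_mod x 94
  obtain ⟨ha, hb⟩ := h
  split <;> omega

theorem pvSlot_lt (x : Int) : pvSlot x < 94 := by
  have h0 := PySem.Int.mod_nonneg x (b := 94) (by norm_num)
  have h1 := PySem.Int.mod_lt x (b := 94) (by norm_num)
  unfold pvSlot; omega

theorem pvSlot_cast (x : Int) :
    (pvSlot x : Int) = PySem.Int.mod x 94 := by
  have h0 := PySem.Int.mod_nonneg x (b := 94) (by norm_num)
  unfold pvSlot; omega

theorem pvSlot_spec (x : Int) (h : pvInRange x) :
    (pvSlot x : Int) = if 0 ≤ x then x else x + 94 := by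
  rw [pvSlot_cast, pvMod_spec x h]

theorem pvSetD_eq {α : Type} (l : List α) (x : Int) (v : α) (hl : l.length = 94)
    (h : pvInRange x) : PySem.List.pySetD l x v = l.set (pvSlot x) v := by
  have hs := pvSlot_spec x h
  obtain ⟨ha, hb⟩ := h
  simp only [PySem.List.pySetD, PySem.List.pySet?, PySem.List.pyIdx?, hl]
  split
  · split
    · simp only [Option.map_some, Option.getD_some]
      congr 1; omega
    · omega
  · split
    · simp only [Option.map_some, Option.getD_some]
      congr 1; omega
    · omega

theorem pvGetD_eq {α : Type} (l : List α) (x : Int) (d : α) (hl : l.length = 94)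
    (h : pvInRange x) : PySem.List.pyGetD l x d = l.getD (pvSlot x) d := by
  have hs := pvSlot_spec x h
  obtain ⟨ha, hb⟩ := h
  simp only [PySem.List.pyGetD, PySem.List.pyGet?, PySem.List.pyIdx?, hl,
    List.getD_eq_getElem?_getD]
  split
  · split
    · rw [Option.bind_some]
      congr 2; omega
    · omega
  · split
    · rw [Option.bind_some]
      congr 2; omega
    · omega

theorem pvGetD_set_lt {α : Type} (l : List α) (i j : Nat) (v : α) (d : α)
    (hi : i < l.length) : (l.set i v).getD j d = if j = i then v else l.getD j d := by
  by_cases hji : j = i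
  · subst hji
    rw [List.getD_eq_getElem?_getD, List.getElem?_set_self, if_pos rfl]
    · simp
    · exact hi
  · rw [List.getD_eq_getElem?_getD, List.getElem?_set_ne (by omega), if_neg hji,
      List.getD_eq_getElem?_getD]

theorem pvEqualNil (S : PySem.Set Int) :
    PySem.Set.equal S PySem.Set.empty = ((S.length : Int) == 0) := by
  cases S with
  | nil => rfl
  | cons a t =>
      have h1 : PySem.Set.equal (a :: t) PySem.Set.empty = false := by
        by_contra h
        have := (PySem.Set.equal_iff (a :: t) PySem.Set.empty).mp
          (by revert h; cases PySem.Set.equal (a :: t) PySem.Set.empty <;> simp)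
        have := (this a).mp (by simp)
        simp [PySem.Set.empty] at this
      rw [h1]
      have : (((a :: t).length : Int) == 0) = false := by
        simp [List.length_cons]
        omega
      rw [this]

def pvDStep (x : Int) (cs : List (Option (PySem.Set Int))) (i : Int) :
    List (Option (PySem.Set Int)) :=
  match PySem.List.pyGetD cs i none with
  | none => cs
  | some s => PySem.List.pySetD cs i (some (PySem.Set.discard s x))

theorem pvRange94 : PySem.List.pyRange 0 94 1 = (List.range 94).map (fun k : Nat => (k : Int)) := by
  decide

theorem pvDiscard_aux (x : Int) :
    ∀ (l pre : List (Option (PySem.Set Int))),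
      ((List.range l.length).map (fun t => ((t + pre.length : Nat) : Int))).foldl (pvDStep x) (pre ++ l)
        = pre ++ l.map (Option.map (fun s => PySem.Set.discard s x)) := by
  intro l
  induction l with
  | nil => intro pre; simp
  | cons o l ih =>
      intro pre
      rw [List.length_cons, List.range_succ_eq_map]
      simp only [List.map_cons, List.map_map]
      rw [List.foldl_cons]
      have hstep : pvDStep x (pre ++ o :: l) ((0 + pre.length : Nat) : Int)
          = pre ++ [Option.map (fun s => PySem.Set.discard s x) o] ++ l := by
        simp only [Nat.zero_add, pvDStep, PySem.List.pyGetD_natCast]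
        cases o with
        | none =>
            rw [List.getD_eq_getElem?_getD, List.getElem?_append_right (le_refl _)]
            simp
        | some s =>
            rw [List.getD_eq_getElem?_getD, List.getElem?_append_right (le_refl _)]
            simp only [Nat.sub_self, List.getElem?_cons_zero, Option.getD_some,
              PySem.List.pySetD_natCast]
            rw [List.set_append]
            simp
      rw [hstep]
      have := ih (pre ++ [Option.map (fun s => PySem.Set.discard s x) o])
      simp only [List.length_append, List.length_cons, List.length_nil] at this ⊢
      rw [List.append_assoc] at this
      simp only [List.singleton_append] at this
      have hfun : List.map ((fun t => ((t + pre.length : Nat) : Int)) ∘ Nat.succ) (List.range l.length)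
          = List.map (fun t => ((t + (pre.length + (0 + 1)) : Nat) : Int)) (List.range l.length) := by
        apply List.map_congr_left
        intro a _
        simp only [Function.comp]
        congr 1
        omega
      rw [hfun]
      rw [List.append_assoc, List.singleton_append]
      rw [← List.singleton_append, ← List.append_assoc] at this
      simpa using this

theorem pvDiscardAll_eq (conns : List (Option (PySem.Set Int))) (k : Nat)
    (h94 : conns.length = 94) :
    pvDiscardAllA conns k
      = conns.map (Option.map (fun s => PySem.Set.discard s (k : Int))) := by
  have haux := pvDiscard_aux (k : Int) conns []
  simp only [List.nil_append, List.length_nil, Nat.add_zero] at haux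
  unfold pvDiscardAllA
  rw [pvRange94, ← h94]
  have hfun : (fun (cs : List (Option (PySem.Set Int))) (i : Int) =>
      match PySem.List.pyGetD cs i none with
      | none => cs
      | some s => PySem.List.pySetD cs i (some (PySem.Set.discard s (k : Int))))
      = pvDStep (k : Int) := by
    funext cs i
    rfl
  rw [hfun]
  exact haux

theorem pvFindIdx_bridge {α : Type} :
    ∀ (xs : List α) (p : α → Bool) (q : Nat → Bool),
      (∀ (j : Nat) (h : j < xs.length), p xs[j] = q j) →
      xs.findIdx? p = (List.range xs.length).find? q := by
  intro xs
  induction xs with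
  | nil => intro p q h; simp
  | cons x xs ih =>
      intro p q h
      rw [List.findIdx?_cons, List.length_cons, List.range_succ_eq_map]
      rw [List.find?_cons]
      have h0 : p x = q 0 := h 0 (by simp)
      rw [← h0]
      cases hp : p x with
      | true => simp
      | false =>
          simp only [Bool.false_eq_true, if_false]
          rw [List.find?_map]
          have := ih p (fun j => q (j + 1)) (fun j hj => by
            have := h (j + 1) (by simpa using Nat.succ_lt_succ hj)
            simpa using this)
          rw [this]
          congr 1

def pvCodes (login : String) : List Int :=
  login.toList.map (fun ch => (ch.toNat : Int) - 33)

def pvEnsureA (conns : List (Option (PySem.Set Int))) (x : Int) :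
    List (Option (PySem.Set Int)) :=
  match PySem.List.pyGetD conns x none with
  | none => PySem.List.pySetD conns x (some PySem.Set.empty)
  | some _ => conns

def pvEdgeA (conns : List (Option (PySem.Set Int))) (p x : Int) :
    List (Option (PySem.Set Int)) :=
  match PySem.List.pyGetD conns x none with
  | none => PySem.List.pySetD conns x (some (PySem.Set.add PySem.Set.empty p))
  | some s =>
      PySem.List.pySetD conns x
        (some (PySem.Set.update s (PySem.Set.add PySem.Set.empty p)))

theorem pvBuildA_eq (conns : List (Option (PySem.Set Int))) (login : String) :
    pvBuildA conns login =
      pvEdgeA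
        (pvEdgeA (pvEnsureA conns (PySem.List.pyGetD (pvCodes login) 0 0))
          (PySem.List.pyGetD (pvCodes login) 0 0) (PySem.List.pyGetD (pvCodes login) 1 0))
        (PySem.List.pyGetD (pvCodes login) 1 0) (PySem.List.pyGetD (pvCodes login) 2 0) := by
  have hr : PySem.List.pyRange 0 3 1 = [0, 1, 2] := by decide
  unfold pvBuildA
  rw [hr]
  simp only [List.foldl_cons, List.foldl_nil]
  have h0 : pvStepA (pvCodes login) conns 0 = pvEnsureA conns (PySem.List.pyGetD (pvCodes login) 0 0) := by
    simp [pvStepA, pvEnsureA]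
  have h1 : ∀ cs, pvStepA (pvCodes login) cs 1
      = pvEdgeA cs (PySem.List.pyGetD (pvCodes login) 0 0) (PySem.List.pyGetD (pvCodes login) 1 0) := by
    intro cs
    simp [pvStepA, pvEdgeA]
  have h2 : ∀ cs, pvStepA (pvCodes login) cs 2
      = pvEdgeA cs (PySem.List.pyGetD (pvCodes login) 1 0) (PySem.List.pyGetD (pvCodes login) 2 0) := by
    intro cs
    simp [pvStepA, pvEdgeA]
  rw [show (pvCodes login) = login.toList.map (fun ch => (ch.toNat : Int) - 33) from rfl] at h0 h1 h2
  rw [h0, h1, h2]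
  rfl

theorem pvUpdate_add (s : PySem.Set Int) (q : Int) :
    PySem.Set.update s (PySem.Set.add PySem.Set.empty q) = PySem.Set.add s q := rfl

theorem pvCodes_range (login : String) (hdom : pvDomStr login = true) (k : Int) :
    pvInRange (PySem.List.pyGetD (pvCodes login) k 0) := by
  unfold PySem.List.pyGetD
  cases hg : PySem.List.pyGet? (pvCodes login) k with
  | none => exact ⟨by norm_num, by norm_num⟩
  | some v =>
      have hv : v ∈ pvCodes login := PySem.List.mem_of_pyGet?_eq_some (pvCodes login) hg
      unfold pvCodes at hv
      obtain ⟨ch, hch, rfl⟩ := List.mem_map.mp hv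
      have := List.all_eq_true.mp hdom ch hch
      simp only [pvDomChar, Bool.or_eq_true, Bool.and_eq_true, decide_eq_true_eq,
        beq_iff_eq] at this
      simp only [Option.getD_some]
      constructor <;> omega

-- ---- build phase: B's state equals A's state ----

theorem pvEdgeB_eq (preds : List (Option (PySem.Set Int))) (p c : Int)
    (hl : preds.length = 94) (hc : pvInRange c) :
    pvEdgeB preds (p, c) = pvEdgeA preds p c := by
  have hslt : pvSlot c < 94 := pvSlot_lt c
  unfold pvEdgeB pvEdgeA
  rw [pvGetD_eq preds c none hl hc]
  cases h : preds.getD (pvSlot c) none with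
  | some s =>
      simp only []
      rw [pvGetD_eq preds c none hl hc, h]
      rw [pvUpdate_add]
  | none =>
      simp only []
      have hlen1 : (PySem.List.pySetD preds c (some PySem.Set.empty)).length = 94 := by
        rw [pvSetD_eq preds c _ hl hc]; simp [hl]
      rw [pvGetD_eq _ c none hlen1 hc]
      rw [pvSetD_eq preds c _ hl hc, pvGetD_set_lt _ _ _ _ _ (by omega), if_pos rfl]
      simp only []
      rw [pvSetD_eq _ c _ (by simp [hl]) hc, List.set_set]
      rw [pvSetD_eq preds c _ hl hc]

theorem pvEnsureA_len (preds : List (Option (PySem.Set Int))) (x : Int)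
    (hl : preds.length = 94) (hx : pvInRange x) : (pvEnsureA preds x).length = 94 := by
  unfold pvEnsureA
  cases h : PySem.List.pyGetD preds x none with
  | none => rw [pvSetD_eq preds x _ hl hx]; simp [hl]
  | some s => exact hl

theorem pvEdgeA_len (preds : List (Option (PySem.Set Int))) (p x : Int)
    (hl : preds.length = 94) (hx : pvInRange x) : (pvEdgeA preds p x).length = 94 := by
  unfold pvEdgeA
  cases h : PySem.List.pyGetD preds x none with
  | none => rw [pvSetD_eq preds x _ hl hx]; simp [hl]
  | some s => rw [pvSetD_eq preds x _ hl hx]; simp [hl]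

theorem pvCodes_get (login : String) (hlen : 3 ≤ login.toList.length) :
    ∃ a b c t, pvCodes login = a :: b :: c :: t := by
  have h : 3 ≤ (pvCodes login).length := by
    unfold pvCodes; simpa using hlen
  match hc : pvCodes login with
  | [] => rw [hc] at h; simp at h
  | [a] => rw [hc] at h; simp at h
  | [a, b] => rw [hc] at h; simp at h
  | a :: b :: c :: t => exact ⟨a, b, c, t, rfl⟩

theorem pvBuildB_eq (preds : List (Option (PySem.Set Int))) (login : String)
    (hl : preds.length = 94) (hdom : pvDomStr login = true)
    (hlen : 3 ≤ login.toList.length) :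
    pvBuildB preds login = pvBuildA preds login := by
  obtain ⟨a, b, c, t, hc⟩ := pvCodes_get login hlen
  have h0 : PySem.List.pyGetD (pvCodes login) 0 0 = a := by
    rw [hc, PySem.List.pyGetD_zero_cons]
  have h1 : PySem.List.pyGetD (pvCodes login) 1 0 = b := by
    rw [hc, PySem.List.pyGetD_eq_getElem _ _ (by norm_num) (by simp; omega)]
    rfl
  have h2 : PySem.List.pyGetD (pvCodes login) 2 0 = c := by
    rw [hc, PySem.List.pyGetD_eq_getElem _ _ (by norm_num) (by simp; omega)]
    rfl
  have hra : pvInRange a := h0 ▸ pvCodes_range login hdom 0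
  have hrb : pvInRange b := h1 ▸ pvCodes_range login hdom 1
  have hrc : pvInRange c := h2 ▸ pvCodes_range login hdom 2
  have hcodes : login.toList.map (fun ch => (ch.toNat : Int) - 33) = a :: b :: c :: t := hc
  unfold pvBuildB
  rw [pvBuildA_eq, h0, h1, h2]
  simp only [hcodes]
  have hens : (match PySem.List.pyGetD preds a none with
      | none => PySem.List.pySetD preds a (some PySem.Set.empty)
      | some _ => preds) = pvEnsureA preds a := rfl
  rw [hens]
  have hl1 : (pvEnsureA preds a).length = 94 := pvEnsureA_len preds a hl hra
  rw [List.foldl_cons, List.foldl_cons, List.foldl_nil]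
  rw [pvEdgeB_eq _ a b hl1 hrb]
  rw [pvEdgeB_eq _ b c (pvEdgeA_len _ a b hl1 hrb) hrc]

theorem pvBuildFold :
    ∀ (logins : List String) (preds : List (Option (PySem.Set Int))),
      preds.length = 94 →
      (∀ l ∈ logins, pvDomStr l = true ∧ 3 ≤ l.toList.length) →
      logins.foldl pvBuildB preds = logins.foldl pvBuildA preds ∧
      (logins.foldl pvBuildA preds).length = 94 := by
  intro logins
  induction logins with
  | nil => intro preds hl _; exact ⟨rfl, hl⟩
  | cons l ls ih =>
      intro preds hl hall
      obtain ⟨hdom, hlen⟩ := hall l (by simp)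
      have hstep : pvBuildB preds l = pvBuildA preds l := pvBuildB_eq preds l hl hdom hlen
      have hlen1 : (pvBuildA preds l).length = 94 := by
        rw [pvBuildA_eq]
        exact pvEdgeA_len _ _ _
          (pvEdgeA_len _ _ _ (pvEnsureA_len _ _ hl (pvCodes_range l hdom 0))
            (pvCodes_range l hdom 1))
          (pvCodes_range l hdom 2)
      rw [List.foldl_cons, List.foldl_cons, hstep]
      exact ih (pvBuildA preds l) hlen1 (fun x hx => hall x (by simp [hx]))

-- ---- loop phase: the invariant between A's mutated cells and B's frozen sets + removed ----

def pvCell (preds : List (Option (PySem.Set Int))) (removed : PySem.Set Int) (j : Nat) :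
    Option (PySem.Set Int) :=
  match preds.getD j none with
  | none => none
  | some s =>
      if PySem.Set.contains removed ((j : Nat) : Int) then none
      else some (s.filter (fun p => !(PySem.Set.contains removed p)))

def pvRem (preds : List (Option (PySem.Set Int))) (removed : PySem.Set Int) : Nat :=
  (List.range 94).countP (fun j =>
    (preds.getD j none).isSome && !(PySem.Set.contains removed ((j : Nat) : Int)))

def pvRel (conns preds : List (Option (PySem.Set Int))) (removed : PySem.Set Int) : Prop :=
  conns.length = 94 ∧ preds.length = 94 ∧
  ∀ j : Nat, j < 94 → conns.getD j none = pvCell preds removed j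

theorem pvCell_isSome (preds : List (Option (PySem.Set Int))) (removed : PySem.Set Int)
    (j : Nat) :
    (pvCell preds removed j).isSome
      = ((preds.getD j none).isSome && !(PySem.Set.contains removed ((j : Nat) : Int))) := by
  unfold pvCell
  cases preds.getD j none with
  | none => rfl
  | some s =>
      cases h : PySem.Set.contains removed ((j : Nat) : Int) <;> simp

theorem pvAny_iff (conns preds : List (Option (PySem.Set Int))) (removed : PySem.Set Int)
    (hrel : pvRel conns preds removed) :
    (conns.any (fun o => o.isSome) = true) ↔ pvRem preds removed ≠ 0 := by
  obtain ⟨hlc, _, hcell⟩ := hrel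
  unfold pvRem
  rw [Ne, List.countP_eq_zero]
  simp only [List.any_eq_true, List.mem_range, not_forall]
  constructor
  · rintro ⟨o, ho, hso⟩
    obtain ⟨j, hj, rfl⟩ := List.mem_iff_getElem.mp ho
    have hj94 : j < 94 := by omega
    have := hcell j hj94
    rw [List.getD_eq_getElem?_getD, List.getElem?_eq_getElem hj] at this
    simp only [Option.getD_some] at this
    refine ⟨j, hj94, ?_⟩
    rw [← pvCell_isSome, ← this]
    simp [hso]
  · rintro ⟨j, hj, hq⟩
    have hjl : j < conns.length := by omega
    refine ⟨conns[j], List.getElem_mem hjl, ?_⟩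
    have h := hcell j hj
    rw [List.getD_eq_getElem?_getD, List.getElem?_eq_getElem hjl] at h
    simp only [Option.getD_some] at h
    rw [h, pvCell_isSome]
    simpa using hq

theorem pvReadyPred_eq (preds : List (Option (PySem.Set Int))) (removed : PySem.Set Int)
    (j : Nat) :
    (match preds.getD j none with
      | none => false
      | some s => !(PySem.Set.contains removed ((j : Nat) : Int)) && PySem.Set.issubset s removed)
      = pvEmptyPred (pvCell preds removed j) := by
  unfold pvCell
  cases preds.getD j none with
  | none => rfl
  | some s =>
      cases hcon : PySem.Set.contains removed ((j : Nat) : Int) with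
      | true => simp [pvEmptyPred]
      | false =>
          show PySem.Set.issubset s removed
            = PySem.Set.equal (List.filter (fun p => !(PySem.Set.contains removed p)) s)
                PySem.Set.empty
          rw [pvEqualNil]
          rw [Bool.eq_iff_iff, PySem.Set.issubset_iff]
          simp only [beq_iff_eq, Int.natCast_eq_zero, List.length_eq_zero_iff,
            List.filter_eq_nil_iff]
          constructor
          · intro h x hx
            simp [h x hx]
          · intro h x hx
            have := h x hx
            rw [← PySem.Set.contains_iff]
            revert this
            cases PySem.Set.contains removed x <;> simp

theorem pvFind?_congr {α : Type} :
    ∀ (l : List α) (p q : α → Bool), (∀ x ∈ l, p x = q x) → l.find? p = l.find? q := by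
  intro l
  induction l with
  | nil => intro p q _; rfl
  | cons x xs ih =>
      intro p q h
      rw [List.find?_cons, List.find?_cons, h x (by simp)]
      cases q x with
      | true => rfl
      | false => exact ih p q (fun y hy => h y (by simp [hy]))

theorem pvFind_eq (conns preds : List (Option (PySem.Set Int))) (removed : PySem.Set Int)
    (hrel : pvRel conns preds removed) :
    pvFindReadyB preds removed = (pvFindEmptyA conns).map (fun k : Nat => (k : Int)) := by
  obtain ⟨hlc, hlp, hcell⟩ := hrel
  have hA : pvFindEmptyA conns
      = (List.range 94).find? (fun j => pvEmptyPred (pvCell preds removed j)) := by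
    unfold pvFindEmptyA
    rw [← hlc]
    apply pvFindIdx_bridge
    intro j hj
    have h := hcell j (by omega)
    rw [List.getD_eq_getElem?_getD, List.getElem?_eq_getElem hj] at h
    simp only [Option.getD_some] at h
    rw [h]
  have hB : pvFindReadyB preds removed
      = ((List.range 94).find? (fun j => pvEmptyPred (pvCell preds removed j))).map
          (fun k : Nat => (k : Int)) := by
    unfold pvFindReadyB
    rw [PySem.List.enumerate_eq_map_pyRange preds none]
    rw [show PySem.List.pyRange 0 (PySem.List.len preds) = PySem.List.pyRange 0 94 1 by
      rw [PySem.List.len_eq, hlp]; rfl]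
    rw [pvRange94, List.map_map, List.find?_map, Option.map_map]
    rw [pvFind?_congr (List.range 94) _ (fun j : Nat => pvEmptyPred (pvCell preds removed j)) ?_]
    · congr 1
    · intro j hj
      simp only [Function.comp_apply, PySem.List.pyGetD_natCast]
      exact pvReadyPred_eq preds removed j
  rw [hA, hB]

theorem pvFound_spec (preds : List (Option (PySem.Set Int))) (removed : PySem.Set Int)
    (k : Nat)
    (hf : (List.range 94).find? (fun j => pvEmptyPred (pvCell preds removed j)) = some k) :
    k < 94 ∧ (preds.getD k none).isSome = true ∧
      PySem.Set.contains removed ((k : Nat) : Int) = false := by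
  have hk : k < 94 := by
    have := List.mem_of_find?_eq_some hf
    simpa using this
  have hq := List.find?_some hf
  unfold pvCell at hq
  cases h : preds.getD k none with
  | none => rw [h] at hq; simp [pvEmptyPred] at hq
  | some s =>
      simp only [h] at hq
      refine ⟨hk, by simp, ?_⟩
      split_ifs at hq with hsplit
      · simp [pvEmptyPred] at hq
      · simpa using hsplit

theorem pvNotContains_add (removed : PySem.Set Int) (k j : Nat) (hjk : j ≠ k) :
    PySem.Set.contains (PySem.Set.add removed ((k : Nat) : Int)) ((j : Nat) : Int)
      = PySem.Set.contains removed ((j : Nat) : Int) := by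
  rw [Bool.eq_iff_iff, PySem.Set.contains_iff, PySem.Set.contains_iff, PySem.Set.mem_add]
  constructor
  · rintro (h | h)
    · exact h
    · exfalso; exact hjk (by exact_mod_cast h)
  · exact Or.inl

theorem pvDiscard_filter (removed : PySem.Set Int) (k : Nat) (s : PySem.Set Int) :
    PySem.Set.discard (List.filter (fun p => !(PySem.Set.contains removed p)) s) ((k : Nat) : Int)
      = List.filter (fun p => !(PySem.Set.contains (PySem.Set.add removed ((k : Nat) : Int)) p)) s := by
  show (List.filter (fun p => !(PySem.Set.contains removed p)) s).filter
        (fun y => !(y == ((k : Nat) : Int)))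
    = List.filter (fun p => !(PySem.Set.contains (PySem.Set.add removed ((k : Nat) : Int)) p)) s
  rw [List.filter_filter]
  apply List.filter_congr
  intro x _
  rw [Bool.eq_iff_iff]
  simp only [Bool.and_eq_true, Bool.not_eq_true', beq_eq_false_iff_ne, ne_eq,
    PySem.Set.contains_eq_listContains, List.contains_eq_mem,
    decide_eq_false_iff_not]
  rw [PySem.Set.mem_add]
  constructor
  · rintro ⟨hxk, hxr⟩ (h | h)
    · exact hxr h
    · exact hxk h
  · intro h
    rw [not_or] at h
    exact ⟨h.2, h.1⟩

theorem pvStepRel (conns preds : List (Option (PySem.Set Int))) (removed : PySem.Set Int)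
    (k : Nat) (hrel : pvRel conns preds removed) (hk : k < 94) :
    pvRel (pvDiscardAllA (PySem.List.pySetD conns (k : Int) none) k) preds
      (PySem.Set.add removed ((k : Nat) : Int)) := by
  obtain ⟨hlc, hlp, hcell⟩ := hrel
  have hkr : pvInRange ((k : Nat) : Int) := ⟨by omega, by omega⟩
  have hslotk : pvSlot ((k : Nat) : Int) = k := by
    have := pvSlot_spec ((k : Nat) : Int) hkr
    omega
  have hc1 : PySem.List.pySetD conns ((k : Nat) : Int) none = conns.set k none := by
    rw [pvSetD_eq conns _ none hlc hkr, hslotk]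
  have hc1len : (conns.set k none).length = 94 := by simp [hlc]
  have hmap := pvDiscardAll_eq (conns.set k none) k hc1len
  rw [hc1, hmap]
  refine ⟨by simp [hlc], hlp, ?_⟩
  intro j hj
  have hjget : ((conns.set k none).map (Option.map (fun s => PySem.Set.discard s (k : Int)))).getD j none
      = ((conns.set k none).getD j none).map (fun s => PySem.Set.discard s (k : Int)) := by
    rw [List.getD_eq_getElem?_getD, List.getElem?_map,
      List.getElem?_eq_getElem (by omega : j < (conns.set k none).length)]
    simp only [Option.map_some, Option.getD_some]
    rw [List.getD_eq_getElem?_getD, List.getElem?_eq_getElem (by omega : j < (conns.set k none).length)]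
    rfl
  rw [hjget, pvGetD_set_lt conns k j none none (by omega)]
  by_cases hjk : j = k
  · rw [if_pos hjk]
    unfold pvCell
    cases hpj : preds.getD j none with
    | none => rfl
    | some s =>
        subst hjk
        have hcadd : PySem.Set.contains (PySem.Set.add removed ((j : Nat) : Int)) ((j : Nat) : Int) = true := by
          rw [PySem.Set.contains_iff, PySem.Set.mem_add]
          right
          rfl
        simp
  · rw [if_neg hjk, hcell j hj]
    unfold pvCell
    rw [pvNotContains_add removed k j hjk]
    cases hpj : preds.getD j none with
    | none => rfl
    | some s =>
        cases hcon : PySem.Set.contains removed ((j : Nat) : Int) with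
        | true => rfl
        | false =>
            dsimp only
            rw [if_neg Bool.false_ne_true, if_neg Bool.false_ne_true, Option.map_some,
              pvDiscard_filter]

theorem pvCountFlip :
    ∀ (l : List Nat), l.Nodup → ∀ (k : Nat), k ∈ l → ∀ (q q' : Nat → Bool),
      q k = true → q' k = false → (∀ j ∈ l, j ≠ k → q j = q' j) →
      l.countP q = l.countP q' + 1 := by
  intro l
  induction l with
  | nil => intro _ k hk; simp at hk
  | cons x xs ih =>
      intro hnd k hk q q' hqk hq'k hcong
      rw [List.countP_cons, List.countP_cons]
      rcases List.mem_cons.mp hk with rfl | hk'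
      · rw [hqk, hq'k]
        have hkxs : k ∉ xs := (List.nodup_cons.mp hnd).1
        have : xs.countP q = xs.countP q' := by
          apply List.countP_congr
          intro j hj
          rw [hcong j (by simp [hj]) (fun h => hkxs (h ▸ hj))]
        simp [this]
      · have hxk : x ≠ k := by
          intro h
          exact (List.nodup_cons.mp hnd).1 (h ▸ hk')
        rw [hcong x (by simp) hxk]
        have := ih (List.nodup_cons.mp hnd).2 k hk' q q' hqk hq'k
          (fun j hj hjk => hcong j (by simp [hj]) hjk)
        omega

theorem pvRem_step (preds : List (Option (PySem.Set Int))) (removed : PySem.Set Int)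
    (k : Nat) (hk : k < 94) (hsome : (preds.getD k none).isSome = true)
    (hcon : PySem.Set.contains removed ((k : Nat) : Int) = false) :
    pvRem preds removed = pvRem preds (PySem.Set.add removed ((k : Nat) : Int)) + 1 := by
  unfold pvRem
  apply pvCountFlip (List.range 94) (List.nodup_range) k (by simpa using hk)
  · rw [hsome, hcon]; rfl
  · have : PySem.Set.contains (PySem.Set.add removed ((k : Nat) : Int)) ((k : Nat) : Int) = true := by
      rw [PySem.Set.contains_iff, PySem.Set.mem_add]; right; rfl
    rw [this]; simp
  · intro j _ hjk
    rw [pvNotContains_add removed k j hjk]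

theorem pvPush_ofList (acc : List Char) (c : Char) :
    (String.ofList acc).push c = String.ofList (acc ++ [c]) := by
  rw [@String.push_eq_append (String.ofList acc) c,
    show String.singleton c = String.ofList [c] from rfl, ← String.ofList_append]

theorem pvLoop_eq :
    ∀ (fA : Nat) (pending : Nat) (conns preds : List (Option (PySem.Set Int)))
      (removed : PySem.Set Int) (acc : List Char),
      pvRel conns preds removed → pending = pvRem preds removed → pending < fA →
      pvLoopA fA conns (String.ofList acc) = pvLoopB pending preds removed acc := by
  intro fA
  induction fA with
  | zero => intro pending _ _ _ _ _ _ hlt; omega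
  | succ n ih =>
      intro pending conns preds removed acc hrel hpend hlt
      show (if conns.any (fun o => o.isSome) then _ else some (String.ofList acc)) = _
      cases pending with
      | zero =>
          rw [if_neg]
          · rfl
          · intro h
            exact (pvAny_iff conns preds removed hrel).mp h hpend.symm
      | succ p =>
          rw [if_pos]
          · have hfind := pvFind_eq conns preds removed hrel
            obtain ⟨hlc, hlp, hcell⟩ := hrel
            have hA : pvFindEmptyA conns
                = (List.range 94).find? (fun j => pvEmptyPred (pvCell preds removed j)) := by
              unfold pvFindEmptyA
              rw [← hlc]
              apply pvFindIdx_bridge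
              intro j hj
              have h := hcell j (by omega)
              rw [List.getD_eq_getElem?_getD, List.getElem?_eq_getElem hj] at h
              simp only [Option.getD_some] at h
              rw [h]
            cases hf : pvFindEmptyA conns with
            | none =>
                show none = pvLoopB (p+1) preds removed acc
                show none = (match pvFindReadyB preds removed with
                  | none => none
                  | some i => pvLoopB p preds (PySem.Set.add removed i) (acc ++ [Char.ofNat (i.toNat + 33)]))
                rw [hfind, hf]
                rfl
            | some k =>
                obtain ⟨hk, hsome, hcon⟩ := pvFound_spec preds removed k (hA ▸ hf)
                show pvLoopA n (pvDiscardAllA (PySem.List.pySetD conns ((k : Nat) : Int) none) k)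
                    ((String.ofList acc).push (Char.ofNat (k + 33)))
                  = pvLoopB (p+1) preds removed acc
                have hB : pvLoopB (p+1) preds removed acc
                    = pvLoopB p preds (PySem.Set.add removed ((k : Nat) : Int))
                        (acc ++ [Char.ofNat (((k : Nat) : Int).toNat + 33)]) := by
                  show (match pvFindReadyB preds removed with
                    | none => none
                    | some i => pvLoopB p preds (PySem.Set.add removed i) (acc ++ [Char.ofNat (i.toNat + 33)])) = _
                  rw [hfind, hf]
                  rfl
                rw [hB]
                rw [show ((k : Nat) : Int).toNat = k from Int.toNat_natCast k]
                rw [pvPush_ofList]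
                apply ih
                · exact pvStepRel conns preds removed k ⟨hlc, hlp, hcell⟩ hk
                · have := pvRem_step preds removed k hk hsome hcon
                  omega
                · omega
          · apply (pvAny_iff conns preds removed hrel).mpr
            omega

theorem pvInitRel (preds : List (Option (PySem.Set Int))) (hlp : preds.length = 94) :
    pvRel preds preds PySem.Set.empty := by
  refine ⟨hlp, hlp, ?_⟩
  intro j hj
  unfold pvCell
  cases h : preds.getD j none with
  | none => rfl
  | some s =>
      dsimp only
      rw [if_neg (by simp [PySem.Set.contains_eq_listContains, PySem.Set.empty])]
      congr 1
      rw [List.filter_congr (q := fun _ => true) ?_, List.filter_true]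
      intro x _
      simp [PySem.Set.contains_eq_listContains, PySem.Set.empty]

theorem pvFoldCount :
    ∀ (l : List (Option (PySem.Set Int))) (n : Nat),
      l.foldl (fun n s => if s.isSome then n + 1 else n) n
        = n + l.countP (fun s => s.isSome) := by
  intro l
  induction l with
  | nil => intro n; simp
  | cons x xs ih =>
      intro n
      rw [List.foldl_cons, List.countP_cons]
      cases h : x.isSome <;> (simp [ih]; try omega)

theorem pvCountGetD :
    ∀ (l : List (Option (PySem.Set Int))),
      (List.range l.length).countP (fun j => (l.getD j none).isSome)
        = l.countP (fun s => s.isSome) := by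
  intro l
  induction l with
  | nil => simp
  | cons x xs ih =>
      rw [List.length_cons, List.range_succ_eq_map, List.countP_cons, List.countP_map,
        List.countP_cons]
      have hcomp : ((fun j => (((x :: xs).getD j none).isSome)) ∘ Nat.succ)
          = (fun j => ((xs.getD j none).isSome)) := rfl
      rw [hcomp, ih]
      rfl

theorem pvInitCount (preds : List (Option (PySem.Set Int))) (hlp : preds.length = 94) :
    preds.foldl (fun n s => if s.isSome then n + 1 else n) 0 = pvRem preds PySem.Set.empty := by
  rw [pvFoldCount, Nat.zero_add]
  unfold pvRem
  rw [← pvCountGetD preds, hlp]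
  apply List.countP_congr
  intro j _
  simp [PySem.Set.contains_eq_listContains, PySem.Set.empty]

theorem pvMain (logins : List String) (hdom : Dom_derive_passcode logins)
    (hpre : Pre_derive_passcode logins) :
    derive_passcode logins = derive_passcode_alt logins := by
  unfold derive_passcode derive_passcode_alt
  have hall : ∀ l ∈ logins, pvDomStr l = true ∧ 3 ≤ l.toList.length := by
    intro l hl
    exact ⟨List.all_eq_true.mp hdom l hl, hpre l hl⟩
  obtain ⟨heq, hlen⟩ := pvBuildFold logins (List.replicate 94 none) (by simp) hall
  have h94 : (127 - 33 : Nat) = 94 := by norm_num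
  rw [h94]
  rw [heq]
  rw [show ("" : String) = String.ofList [] from rfl]
  apply pvLoop_eq
  · exact pvInitRel _ hlen
  · exact pvInitCount _ hlen
  · rw [pvInitCount _ hlen]
    unfold pvRem
    have hle := List.countP_le_length (l := List.range 94)
      (p := fun j => ((logins.foldl pvBuildA (List.replicate 94 none)).getD j none).isSome
        && !(PySem.Set.contains PySem.Set.empty ((j : Nat) : Int)))
    rw [List.length_range] at hle
    omega

-- ===== VERDICT (by name: the statement is the Claim_ definition above) =====
theorem derive_passcode_spec : Claim_equal_derive_passcode := by
  intro logins hdom hpre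
  unfold Spec_derive_passcode
  exact pvMain logins hdom hpre
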